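-- pv_equiv track=rewrite | github.com/khadas/android_npu_library | acuity-toolkit/bin/tools/onnx_ruler_generate_assist.py | gen_input_map
-- ===== SOURCE A (Python) =====
-- def gen_input_map(src_in_anchor, acu_layers):
--     port_map = set()
--     input_map = list()
--     for flow in src_in_anchor:
--         src_tensor = flow[0]
--         if src_tensor in port_map:
--             continue
--         else:
--             port = len(port_map)
--             port_map.add(src_tensor)
--         input_map.append([src_tensor, acu_layers[0] + ':in' + str(port)])
--     return input_map
-- ===== SOURCE B (Python) =====
-- def gen_input_map(src_in_anchor, acu_layers):
--     heads = [flow[0] for flow in src_in_anchor]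
--     input_map = []
--     port = 0
--     while heads:
--         t = heads[0]
--         input_map.append([t, acu_layers[0] + ':in' + str(port)])
--         heads = [h for h in heads if h != t]
--         port += 1
--     return input_map
-- ===== Notes on version B (the rewrite author's own statement) =====
-- stated objective: alternative
-- what changed: Replaces the seen-set single pass by a set-free repeated-filter algorithm: take the first remaining head as the next port's tensor, delete every occurrence of it from the remaining heads, and repeat; no membership structure or first-occurrence test is kept at all.
import Mathlib
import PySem

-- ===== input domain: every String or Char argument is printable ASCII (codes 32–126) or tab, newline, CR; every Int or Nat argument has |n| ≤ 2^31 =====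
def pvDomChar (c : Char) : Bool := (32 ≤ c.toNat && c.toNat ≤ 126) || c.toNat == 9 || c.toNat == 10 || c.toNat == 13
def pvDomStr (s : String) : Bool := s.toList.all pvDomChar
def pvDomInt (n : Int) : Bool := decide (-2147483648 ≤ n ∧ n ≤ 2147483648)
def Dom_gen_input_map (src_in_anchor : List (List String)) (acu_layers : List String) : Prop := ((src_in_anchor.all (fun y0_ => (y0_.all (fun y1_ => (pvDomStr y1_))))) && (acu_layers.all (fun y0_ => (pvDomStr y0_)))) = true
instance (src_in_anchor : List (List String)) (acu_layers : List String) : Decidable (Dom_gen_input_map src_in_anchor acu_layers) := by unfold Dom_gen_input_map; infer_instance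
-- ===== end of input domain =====

-- B replaces A's seen-set loop by a set-free repeated-filter recursion (emit first head, delete its occurrences, recurse); objective: alternative.


-- ===== PORT A =====
def gen_input_map (src_in_anchor : List (List String)) (acu_layers : List String) : List (List String) :=
  -- src_tensor = flow[0] is written inline as 'PySem.List.pyGetD flow 0 ""'; Pre_ excludes empty flows
  (src_in_anchor.foldl
    (fun (st : PySem.Set String × List (List String)) flow =>
      if PySem.Set.contains st.1 (PySem.List.pyGetD flow 0 "") then
        st                                            -- 'continue'
      else
        (PySem.Set.add st.1 (PySem.List.pyGetD flow 0 ""),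
         st.2 ++ [[PySem.List.pyGetD flow 0 "",
                   PySem.List.pyGetD acu_layers 0 "" ++ ":in" ++ PySem.Int.toStr (PySem.Set.len st.1)]]))
    (PySem.Set.empty, [])).2

-- ===== PORT B =====
-- the 'while heads:' loop of Source B: state = (heads, port, input_map accumulator)
def pvGoB (heads : List String) (pref : String) (port : Int) (out : List (List String)) : List (List String) :=
  match heads with
  | [] => out
  | t :: rest =>
      pvGoB ((t :: rest).filter (fun h => h ≠ t)) pref (port + 1)
        (out ++ [[t, pref ++ PySem.Int.toStr port]])
termination_by heads.length
decreasing_by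
  simp only [List.filter_cons, ne_eq, not_true_eq_false, decide_false,
    Bool.false_eq_true, if_false, List.length_cons]
  exact Nat.lt_succ_of_le (List.length_filter_le _ _)

def gen_input_map_alt (src_in_anchor : List (List String)) (acu_layers : List String) : List (List String) :=
  pvGoB (src_in_anchor.map (fun flow => PySem.List.pyGetD flow 0 ""))
    (PySem.List.pyGetD acu_layers 0 "" ++ ":in") 0 []

-- ===== PRECONDITION & SPEC =====
-- Pre_ excludes exactly the inputs on which A raises IndexError: an empty inner flow list (flow[0]),
-- or an empty acu_layers while some flow is present (acu_layers[0]).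
def Pre_gen_input_map (src_in_anchor : List (List String)) (acu_layers : List String) : Prop :=
  (∀ flow ∈ src_in_anchor, flow ≠ []) ∧ (src_in_anchor ≠ [] → acu_layers ≠ [])
instance (src_in_anchor : List (List String)) (acu_layers : List String) : Decidable (Pre_gen_input_map src_in_anchor acu_layers) := by unfold Pre_gen_input_map; infer_instance
def pvWitness_gen_input_map : List (List String) × List String := ([["t0"], ["t1", "x"], ["t0"]], ["layer"])

def Spec_gen_input_map (src_in_anchor : List (List String)) (acu_layers : List String) (out : List (List String)) : Prop := out = gen_input_map_alt src_in_anchor acu_layers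
instance (src_in_anchor : List (List String)) (acu_layers : List String) (out : List (List String)) : Decidable (Spec_gen_input_map src_in_anchor acu_layers out) := by unfold Spec_gen_input_map; infer_instance

-- ===== CLAIM =====
def Claim_equal_gen_input_map : Prop := ∀ (src_in_anchor : List (List String)) (acu_layers : List String), Dom_gen_input_map src_in_anchor acu_layers → Pre_gen_input_map src_in_anchor acu_layers → Spec_gen_input_map src_in_anchor acu_layers (gen_input_map src_in_anchor acu_layers)

-- ===== LEMMAS AND PROOFS =====

-- Loop invariant linking the two algorithms: A's fold over the head strings, started from
-- seen-set s and accumulator acc, equals B's repeated-filter recursion run on the heads with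
-- the already-seen ones filtered out, with the port counter at len(s).
theorem pvGoB_cons (t : String) (rest : List String) (pref : String) (port : Int) (out : List (List String)) :
    pvGoB (t :: rest) pref port out
    = pvGoB ((t :: rest).filter (fun h => h ≠ t)) pref (port + 1)
        (out ++ [[t, pref ++ PySem.Int.toStr port]]) := by
  rw [pvGoB.eq_def]

theorem pv_fold_eq (pref : String) (ts : List String) (s : PySem.Set String) (acc : List (List String)) :
    (ts.foldl
      (fun (st : PySem.Set String × List (List String)) t =>
        if PySem.Set.contains st.1 t then st
        else (PySem.Set.add st.1 t,
              st.2 ++ [[t, pref ++ PySem.Int.toStr (PySem.Set.len st.1)]]))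
      (s, acc)).2
    = pvGoB (ts.filter (fun t => !PySem.Set.contains s t)) pref (s.length : Int) acc := by
  induction ts generalizing s acc with
  | nil => simp [pvGoB]
  | cons t ts ih =>
    by_cases h : PySem.Set.contains s t
    · simp only [List.foldl_cons, List.filter_cons, h, if_pos, Bool.not_true, Bool.false_eq_true,
        if_false]
      exact ih s acc
    · have hB : PySem.Set.contains s t = false := by simpa using h
      have hmem : t ∉ s := by simpa using hB
      have hadd : PySem.Set.add s t = s ++ [t] := PySem.Set.add_of_not_mem hmem
      have hfil : (t :: ts).filter (fun x => !PySem.Set.contains s x)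
          = t :: ts.filter (fun x => !PySem.Set.contains s x) := by
        simp [hmem]
      rw [List.foldl_cons, if_neg h, hadd, hfil, pvGoB_cons, ih (s ++ [t])]
      congr 1
      · -- the two filters coincide
        simp only [List.filter_cons, ne_eq, not_true_eq_false, decide_false,
          Bool.false_eq_true, if_false, List.filter_filter]
        apply List.filter_congr
        intro x _
        simp [PySem.Set.contains, eq_comm, Bool.and_comm]
      · -- the port counters coincide
        simp only [List.length_append, List.length_cons, List.length_nil]
        push_cast
        ring

-- ===== VERDICT =====
theorem gen_input_map_spec : Claim_equal_gen_input_map := by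
  intro src acu _ _
  unfold Spec_gen_input_map gen_input_map gen_input_map_alt
  rw [show (List.foldl
        (fun (st : PySem.Set String × List (List String)) flow =>
          if PySem.Set.contains st.1 (PySem.List.pyGetD flow 0 "") then st
          else (PySem.Set.add st.1 (PySem.List.pyGetD flow 0 ""),
                st.2 ++ [[PySem.List.pyGetD flow 0 "",
                          PySem.List.pyGetD acu 0 "" ++ ":in" ++ PySem.Int.toStr (PySem.Set.len st.1)]]))
        (PySem.Set.empty, ([] : List (List String))) src)
      = List.foldl
          (fun (st : PySem.Set String × List (List String)) t =>
            if PySem.Set.contains st.1 t then st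
            else (PySem.Set.add st.1 t,
                  st.2 ++ [[t, (PySem.List.pyGetD acu 0 "" ++ ":in") ++ PySem.Int.toStr (PySem.Set.len st.1)]]))
          (PySem.Set.empty, [])
          (src.map (fun flow => PySem.List.pyGetD flow 0 ""))
    from by rw [List.foldl_map]]
  rw [pv_fold_eq (PySem.List.pyGetD acu 0 "" ++ ":in")
        (src.map (fun flow => PySem.List.pyGetD flow 0 "")) PySem.Set.empty []]
  simp [PySem.Set.empty, PySem.Set.contains]
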